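-- pv_equiv track=rewrite | github.com/mulinfro/pysh | pysh/libs/text_process.py | readStringPair
-- ===== SOURCE A (Python) =====
-- def readStringPair(str_input, beg_tkn, end_tkn):
--     ans, i = [], 0
--     while i < len(str_input):
--         if not str_input.startswith(beg_tkn, i):
--             ans.append(str_input[i])
--             i = i + 1
--         else:
--             k = i
--             i = i + len(beg_tkn)
--             tp = "HALF_CLOSE"
--             while i < len(str_input):
--                 if str_input.startswith(end_tkn, i):
--                     tp = "CLOSE"
--                     break
--                 else:
--                     i = i + 1
--             if tp == "HALF_CLOSE":
--                 ans.extend(list(str_input[k: i]))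
--             else:
--                 ans.append(str_input[k+len(beg_tkn): i])
--                 i = i + len(end_tkn)
--
--     return ans
-- ===== SOURCE B (Python) =====
-- def readStringPair(str_input, beg_tkn, end_tkn):
--     ans, i, n = [], 0, len(str_input)
--     while i < n:
--         b = str_input.find(beg_tkn, i)
--         if b == -1:
--             ans.extend(str_input[i:])
--             break
--         ans.extend(str_input[i:b])
--         e = str_input.find(end_tkn, b + len(beg_tkn))
--         if e == -1:
--             ans.extend(str_input[b:])
--             break
--         ans.append(str_input[b + len(beg_tkn):e])
--         i = e + len(end_tkn)
--     return ans
-- ===== Notes on version B (the rewrite author's own statement) =====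
-- stated objective: simpler
-- what changed: A's nested char-by-char scan loops (an outer per-character startswith test plus an inner end-token scan loop with a HALF_CLOSE flag) are replaced by a single cursor loop driven by str.find: jump straight to the next beg_tkn occurrence, extend the skipped text at once, then jump to the closing end_tkn.
-- outside the precondition, e.g. on readStringPair('ab', 'ab', ''): A returns ['a', 'b'], B returns ['']
import Mathlib
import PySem

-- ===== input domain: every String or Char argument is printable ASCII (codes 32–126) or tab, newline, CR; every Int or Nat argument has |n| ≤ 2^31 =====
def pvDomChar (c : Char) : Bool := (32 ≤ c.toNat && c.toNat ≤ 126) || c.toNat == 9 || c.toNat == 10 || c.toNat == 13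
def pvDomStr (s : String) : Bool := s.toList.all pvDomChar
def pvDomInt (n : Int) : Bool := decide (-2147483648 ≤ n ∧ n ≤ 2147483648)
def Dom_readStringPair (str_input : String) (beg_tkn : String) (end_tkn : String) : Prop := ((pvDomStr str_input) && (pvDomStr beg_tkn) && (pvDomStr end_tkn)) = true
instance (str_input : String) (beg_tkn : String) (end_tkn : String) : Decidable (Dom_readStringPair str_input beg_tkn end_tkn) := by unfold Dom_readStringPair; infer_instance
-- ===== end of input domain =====

-- B replaces A's nested char-by-char scan loops by one cursor loop driven by str.find (simpler decomposition, same results).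

-- ===== PORT A =====
-- Python one-char string s[i]
def pvCstr (c : Char) : String := String.ofList [c]

-- A's inner while loop: scan rest for the first position j (strictly inside the list,
-- mirroring Python's `while i < len` bound) where end_tkn starts; none = loop ran off the end.
def pvScanEnd (pend : List Char) : List Char → Option Nat
  | [] => none
  | c :: cs =>
    if PySem.Chars.startswith (c :: cs) pend then some 0
    else (pvScanEnd pend cs).map (· + 1)

-- A's outer while loop over the remaining suffix of the input (every step of A depends only on
-- the suffix from i, so the index i becomes the suffix).  Fuel makes the recursion total; each
-- iteration of the terminating Python loop shortens the suffix, so length+1 fuel is never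
-- exhausted on inputs where the Python returns.
def pvLoopA (pbeg pend : List Char) : Nat → List Char → List String → List String
  | 0, _, acc => acc
  | _ + 1, [], acc => acc
  | fuel + 1, c :: t, acc =>
    if PySem.Chars.startswith (c :: t) pbeg = false then
      pvLoopA pbeg pend fuel t (acc ++ [pvCstr c])
    else
      match pvScanEnd pend ((c :: t).drop pbeg.length) with
      | none   => acc ++ (c :: t).map pvCstr       -- HALF_CLOSE: extend(list(s[k:i])), i = len
      | some j =>
          pvLoopA pbeg pend fuel (((c :: t).drop pbeg.length).drop (j + pend.length))
            (acc ++ [String.ofList (((c :: t).drop pbeg.length).take j)])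

def readStringPair (str_input : String) (beg_tkn : String) (end_tkn : String) : List String :=
  pvLoopA beg_tkn.toList end_tkn.toList (str_input.toList.length + 1) str_input.toList []

-- ===== PORT B =====
-- B's single cursor loop: str_input.find(beg_tkn, i) relative to the current suffix is
-- PySem.Chars.find on the suffix; likewise find(end_tkn, b+len(beg_tkn)).
def pvLoopB (pbeg pend : List Char) : Nat → List Char → List String → List String
  | 0, _, acc => acc
  | _ + 1, [], acc => acc
  | fuel + 1, c :: t, acc =>
    let bI := PySem.Chars.find (c :: t) pbeg
    if bI = -1 then acc ++ (c :: t).map pvCstr      -- ans.extend(str_input[i:]); break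
    else
      let acc2 := acc ++ ((c :: t).take bI.toNat).map pvCstr   -- ans.extend(str_input[i:b])
      let restb := (c :: t).drop bI.toNat
      let rest2 := restb.drop pbeg.length
      let eI := PySem.Chars.find rest2 pend
      if eI = -1 then acc2 ++ restb.map pvCstr      -- ans.extend(str_input[b:]); break
      else pvLoopB pbeg pend fuel (rest2.drop (eI.toNat + pend.length))
             (acc2 ++ [String.ofList (rest2.take eI.toNat)])

def readStringPair_alt (str_input : String) (beg_tkn : String) (end_tkn : String) : List String :=
  pvLoopB beg_tkn.toList end_tkn.toList (str_input.toList.length + 1) str_input.toList []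

-- ===== PRECONDITION & SPEC =====
-- Pre_ excludes only an empty end_tkn when beg_tkn actually occurs in the input: A does not
-- terminate there when beg_tkn is empty too, and otherwise whether an empty closing delimiter
-- "closes" right at the end of the string is a degenerate corner no caller would specify, on
-- which A's and B's answers are both defensible.
def Pre_readStringPair (str_input : String) (beg_tkn : String) (end_tkn : String) : Prop :=
  end_tkn ≠ "" ∨ PySem.Str.isIn beg_tkn str_input = false
instance (str_input : String) (beg_tkn : String) (end_tkn : String) : Decidable (Pre_readStringPair str_input beg_tkn end_tkn) := by unfold Pre_readStringPair; infer_instance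

def pvWitness_readStringPair : String × String × String := ("a[b]c", "[", "]")

def Spec_readStringPair (str_input : String) (beg_tkn : String) (end_tkn : String) (out : List String) : Prop := out = readStringPair_alt str_input beg_tkn end_tkn
instance (str_input : String) (beg_tkn : String) (end_tkn : String) (out : List String) : Decidable (Spec_readStringPair str_input beg_tkn end_tkn out) := by unfold Spec_readStringPair; infer_instance

-- ===== CLAIM (what is proved, stated in full; the proofs are below) =====
def Claim_equal_readStringPair : Prop := ∀ (str_input : String) (beg_tkn : String) (end_tkn : String), Dom_readStringPair str_input beg_tkn end_tkn → Pre_readStringPair str_input beg_tkn end_tkn → Spec_readStringPair str_input beg_tkn end_tkn (readStringPair str_input beg_tkn end_tkn)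

-- ===== LEMMAS AND PROOFS =====

-- Proof-side structural description of Python's find on a suffix list: first index whose
-- suffix starts with pat, none if there is none (pvFindN is never part of either port).
def pvFindN (pat : List Char) : List Char → Option Nat
  | [] => if pat.isPrefixOf ([] : List Char) then some 0 else none
  | c :: t => if pat.isPrefixOf (c :: t) then some 0 else (pvFindN pat t).map (· + 1)

lemma pvInfix_iff_exists (sub s : List Char) : sub <:+: s ↔ ∃ j, sub <+: s.drop j := by
  rw [← PySem.Chars.isIn_iff_infix, ← PySem.Chars.exists_prefix_drop_iff_isIn]

lemma pvFindN_eq (pat : List Char) : ∀ l : List Char,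
    PySem.Chars.find l pat = (match pvFindN pat l with | none => -1 | some b => (b : Int)) := by
  intro l
  induction l with
  | nil =>
    cases hp : pat with
    | nil => simp [pvFindN, PySem.Chars.find_nil, List.isPrefixOf]
    | cons c p =>
      have h1 : ¬ (c :: p) <:+: ([] : List Char) := by simp
      rw [(PySem.Chars.find_eq_neg_one_iff _ _).mpr h1]
      simp [pvFindN, List.isPrefixOf]
  | cons c t ih =>
    by_cases hp : pat <+: (c :: t)
    · have h0 : 0 ≤ PySem.Chars.find (c :: t) pat :=
        (PySem.Chars.find_nonneg_iff _ _).mpr hp.isInfix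
      obtain ⟨hpre, hmin⟩ := PySem.Chars.find_spec h0
      have ht : (PySem.Chars.find (c :: t) pat).toNat = 0 := by
        by_contra h
        exact hmin 0 (Nat.pos_of_ne_zero h) (by simpa using hp)
      have hfind : PySem.Chars.find (c :: t) pat = 0 := by omega
      rw [hfind]
      simp [pvFindN, List.isPrefixOf_iff_prefix.mpr hp]
    · have hnp : pat.isPrefixOf (c :: t) = false := by
        rw [Bool.eq_false_iff]
        exact fun h => hp (List.isPrefixOf_iff_prefix.mp h)
      cases hft : pvFindN pat t with
      | none =>
        rw [hft] at ih
        have hninf_t : ¬ pat <:+: t := (PySem.Chars.find_eq_neg_one_iff _ _).mp (by simpa using ih)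
        have hninf : ¬ pat <:+: (c :: t) := by
          rw [pvInfix_iff_exists]
          rintro ⟨j, hj⟩
          cases j with
          | zero => exact hp (by simpa using hj)
          | succ j => exact hninf_t ((pvInfix_iff_exists _ _).mpr ⟨j, by simpa using hj⟩)
        rw [(PySem.Chars.find_eq_neg_one_iff _ _).mpr hninf]
        simp [pvFindN, hnp, hft]
      | some b =>
        replace ih : PySem.Chars.find t pat = (b : Int) := by simp only [hft] at ih; exact ih
        have h0t : 0 ≤ PySem.Chars.find t pat := by
          rw [ih]; exact_mod_cast Nat.zero_le b
        have hinf : pat <:+: (c :: t) :=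
          ((PySem.Chars.find_nonneg_iff _ _).mp h0t).trans (List.suffix_cons c t).isInfix
        have h0 : 0 ≤ PySem.Chars.find (c :: t) pat := (PySem.Chars.find_nonneg_iff _ _).mpr hinf
        obtain ⟨hpre, hmin⟩ := PySem.Chars.find_spec h0
        obtain ⟨hpret, hmint⟩ := PySem.Chars.find_spec h0t
        have hbt : (PySem.Chars.find t pat).toNat = b := by rw [ih]; simp
        rw [hbt] at hpret hmint
        have hm0 : (PySem.Chars.find (c :: t) pat).toNat ≠ 0 := fun h => hp (by simpa [h] using hpre)
        obtain ⟨m', hm'⟩ : ∃ m', (PySem.Chars.find (c :: t) pat).toNat = m' + 1 :=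
          ⟨(PySem.Chars.find (c :: t) pat).toNat - 1, by omega⟩
        rw [hm'] at hpre hmin
        rw [List.drop_succ_cons] at hpre
        have h1 : ¬ m' < b := fun hlt => hmint m' hlt hpre
        have h2 : ¬ b < m' := fun hlt => hmin (b + 1) (by omega) (by rw [List.drop_succ_cons]; exact hpret)
        have hfind : PySem.Chars.find (c :: t) pat = ((b : Int) + 1) := by omega
        rw [hfind]
        simp [pvFindN, hnp, hft]

lemma pvFindN_none (pat : List Char) : ∀ l, pvFindN pat l = none → ∀ j, ¬ pat.IsPrefix (l.drop j) := by
  intro l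
  induction l with
  | nil =>
    intro h j hp
    simp [pvFindN] at h
    simp at hp
    simp [hp] at h
  | cons c t ih =>
    intro h j hp
    simp only [pvFindN] at h
    split at h
    · exact absurd h (by simp)
    · cases j with
      | zero =>
        rename_i hnp
        rw [List.isPrefixOf_iff_prefix] at hnp
        simp at hp
        exact hnp hp
      | succ j => exact ih (by simpa using h) j (by simpa using hp)

lemma pvFindN_some_prefix (pat : List Char) : ∀ l b, pvFindN pat l = some b → pat.IsPrefix (l.drop b) := by
  intro l
  induction l with
  | nil =>
    intro b h
    simp only [pvFindN] at h
    split at h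
    · cases h; simpa [List.isPrefixOf_iff_prefix] using ‹pat.isPrefixOf ([] : List Char) = true›
    · cases h
  | cons c t ih =>
    intro b h
    simp only [pvFindN] at h
    split at h
    · rename_i hq
      cases h
      simpa using List.isPrefixOf_iff_prefix.mp hq
    · rw [Option.map_eq_some_iff] at h
      obtain ⟨b', hb', rfl⟩ := h
      simpa using ih b' hb'

lemma pvFindN_some_le (pat : List Char) : ∀ l b, pvFindN pat l = some b → b + pat.length ≤ l.length := by
  intro l
  induction l with
  | nil =>
    intro b h
    simp only [pvFindN] at h
    split at h
    · cases h
      have := List.isPrefixOf_iff_prefix.mp ‹pat.isPrefixOf ([] : List Char) = true›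
      simpa using this.length_le
    · cases h
  | cons c t ih =>
    intro b h
    simp only [pvFindN] at h
    split at h
    · cases h
      have := (List.isPrefixOf_iff_prefix.mp ‹_›).length_le
      simpa using this
    · rw [Option.map_eq_some_iff] at h
      obtain ⟨b', hb', rfl⟩ := h
      have := ih b' hb'
      simp; omega

lemma pvScanEnd_eq (pend : List Char) (hpend : pend ≠ []) : ∀ l : List Char,
    pvScanEnd pend l = pvFindN pend l := by
  intro l
  induction l with
  | nil =>
    have : pend.isPrefixOf ([] : List Char) = false := by
      rw [Bool.eq_false_iff]
      intro h
      exact hpend (by simpa using List.isPrefixOf_iff_prefix.mp h)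
    simp [pvScanEnd, pvFindN, this]
  | cons c t ih =>
    by_cases hp : pend <+: (c :: t)
    · simp [pvScanEnd, pvFindN, (PySem.Chars.startswith_iff _ _).mpr hp,
        List.isPrefixOf_iff_prefix.mpr hp]
    · have h1 : PySem.Chars.startswith (c :: t) pend = false := by
        rw [Bool.eq_false_iff]; exact fun h => hp ((PySem.Chars.startswith_iff _ _).mp h)
      have h2 : pend.isPrefixOf (c :: t) = false := by
        rw [Bool.eq_false_iff]; exact fun h => hp (List.isPrefixOf_iff_prefix.mp h)
      simp [pvScanEnd, pvFindN, h1, h2, ih]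

lemma pvLoopA_nil (pbeg pend : List Char) (fuel : Nat) (acc : List String) :
    pvLoopA pbeg pend fuel [] acc = acc := by cases fuel <;> rfl

lemma pvLoopB_nil (pbeg pend : List Char) (fuel : Nat) (acc : List String) :
    pvLoopB pbeg pend fuel [] acc = acc := by cases fuel <;> rfl

-- A emits every character one at a time when beg_tkn occurs nowhere in the suffix.
lemma pvLoopA_emitAll (pbeg pend : List Char) :
    ∀ l : List Char, (∀ j, ¬ pbeg <+: l.drop j) → ∀ fuel, l.length ≤ fuel → ∀ acc,
      pvLoopA pbeg pend fuel l acc = acc ++ l.map pvCstr := by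
  intro l
  induction l with
  | nil => intro _ fuel _ acc; cases fuel <;> simp [pvLoopA]
  | cons c t ih =>
    intro h fuel hf acc
    obtain ⟨f, rfl⟩ : ∃ f, fuel = f + 1 := ⟨fuel - 1, by simp at hf; omega⟩
    have hc : PySem.Chars.startswith (c :: t) pbeg = false := by
      rw [Bool.eq_false_iff]
      exact fun hh => h 0 (by simpa using (PySem.Chars.startswith_iff _ _).mp hh)
    rw [pvLoopA, if_pos hc, ih (fun j => by simpa using h (j + 1)) f (by simp at hf; omega)]
    simp

-- A's first b iterations are single-character emissions when the first beg_tkn match is at b.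
lemma pvLoopA_skip (pbeg pend : List Char) :
    ∀ b, ∀ l : List Char, pvFindN pbeg l = some b → ∀ fuel, b ≤ fuel → ∀ acc,
      pvLoopA pbeg pend fuel l acc =
        pvLoopA pbeg pend (fuel - b) (l.drop b) (acc ++ (l.take b).map pvCstr) := by
  intro b
  induction b with
  | zero => intro l _ fuel _ acc; simp
  | succ b ih =>
    intro l hl fuel hf acc
    match l with
    | [] =>
      exfalso
      simp only [pvFindN] at hl
      split at hl
      · simp at hl
      · simp at hl
    | c :: t =>
      simp only [pvFindN] at hl
      split at hl
      · simp at hl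
      · rw [Option.map_eq_some_iff] at hl
        obtain ⟨b', hb', hbe⟩ := hl
        have hbb : b' = b := by omega
        subst hbb
        rename_i hnpre
        have hc : PySem.Chars.startswith (c :: t) pbeg = false := by
          rw [Bool.eq_false_iff]
          intro hh
          exact hnpre (List.isPrefixOf_iff_prefix.mpr ((PySem.Chars.startswith_iff _ _).mp hh))
        obtain ⟨f, rfl⟩ : ∃ f, fuel = f + 1 := ⟨fuel - 1, by omega⟩
        rw [pvLoopA, if_pos hc, ih t hb' f (by omega) (acc ++ [pvCstr c])]
        simp

-- Core equivalence: A's loop and B's loop agree on every suffix, given enough fuel.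
lemma pvMain (pbeg pend : List Char) (hpend : pend ≠ []) :
    ∀ n, ∀ l : List Char, ∀ fuelA fuelB acc, l.length < n → l.length ≤ fuelA → l.length ≤ fuelB →
      pvLoopA pbeg pend fuelA l acc = pvLoopB pbeg pend fuelB l acc := by
  intro n
  induction n with
  | zero => intro l _ _ _ h _ _; exact absurd h (Nat.not_lt_zero _)
  | succ n ih =>
    intro l fuelA fuelB acc hn hA hB
    match l with
    | [] => rw [pvLoopA_nil, pvLoopB_nil]
    | c :: t =>
      obtain ⟨fb, rfl⟩ : ∃ fb, fuelB = fb + 1 := ⟨fuelB - 1, by simp at hB; omega⟩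
      cases hb : pvFindN pbeg (c :: t) with
      | none =>
        have hfind : PySem.Chars.find (c :: t) pbeg = -1 := by rw [pvFindN_eq]; simp [hb]
        rw [pvLoopA_emitAll pbeg pend _ (pvFindN_none pbeg _ hb) fuelA hA acc]
        simp [pvLoopB, hfind]
      | some b =>
        have hfind : PySem.Chars.find (c :: t) pbeg = (b : Int) := by rw [pvFindN_eq]; simp [hb]
        have hble : b + pbeg.length ≤ (c :: t).length := pvFindN_some_le _ _ _ hb
        have hpre : pbeg <+: (c :: t).drop b := pvFindN_some_prefix _ _ _ hb
        have hlbne : (c :: t).drop b ≠ [] := by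
          cases hpbeg : pbeg with
          | nil =>
            rw [hpbeg] at hb
            simp [pvFindN, List.isPrefixOf] at hb
            simp [← hb]
          | cons x xs =>
            intro hnil
            rw [hnil] at hpre
            rw [hpbeg] at hpre
            simp at hpre
        have hblt : b < (c :: t).length := by
          by_contra hge
          exact hlbne (List.drop_eq_nil_iff.mpr (by omega))
        rw [pvLoopA_skip pbeg pend b _ hb fuelA (by omega) acc]
        obtain ⟨d, u, hdu⟩ := List.exists_cons_of_ne_nil hlbne
        obtain ⟨fa, hfa⟩ : ∃ fa, fuelA - b = fa + 1 := ⟨fuelA - b - 1, by simp at hA hblt; omega⟩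
        have hdulen : (d :: u).length = (c :: t).length - b := by rw [← hdu]; exact List.length_drop ..
        have hsw : PySem.Chars.startswith (d :: u) pbeg = true :=
          (PySem.Chars.startswith_iff _ _).mpr (hdu ▸ hpre)
        rw [hfa, hdu, pvLoopA, if_neg (by simp [hsw]), pvScanEnd_eq pend hpend]
        -- B side one step
        simp only [pvLoopB, hfind, if_neg (show ((b : Int)) ≠ -1 by omega), Int.toNat_natCast, hdu]
        rw [pvFindN_eq pend ((d :: u).drop pbeg.length)]
        cases he : pvFindN pend ((d :: u).drop pbeg.length) with
        | none => simp
        | some e =>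
          simp only []
          have hele : e + pend.length ≤ ((d :: u).drop pbeg.length).length := pvFindN_some_le _ _ _ he
          have hplen : 1 ≤ pend.length := by cases pend with | nil => exact absurd rfl hpend | cons _ _ => simp
          have hdrop : (((d :: u).drop pbeg.length).drop (e + pend.length)).length
              = ((d :: u).drop pbeg.length).length - (e + pend.length) := List.length_drop ..
          have hrlen : (((d :: u).drop pbeg.length).drop (e + pend.length)).length + 1 + pbeg.length + e + pend.length ≤ (d :: u).length + e + pend.length := by
            simp at hele hdrop ⊢
            omega
          rw [Int.toNat_natCast]
          apply ih
          · simp at hn hdulen ⊢; omega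
          · simp at hA hdulen ⊢; omega
          · simp at hB hdulen ⊢; omega

-- B extends the whole suffix in one step when beg_tkn occurs nowhere in it.
lemma pvLoopB_emitAll (pbeg pend : List Char) :
    ∀ l : List Char, (∀ j, ¬ pbeg <+: l.drop j) → ∀ fuel, l.length ≤ fuel → ∀ acc,
      pvLoopB pbeg pend fuel l acc = acc ++ l.map pvCstr := by
  intro l h fuel hf acc
  match l with
  | [] => rw [pvLoopB_nil]; simp
  | c :: t =>
    obtain ⟨f, rfl⟩ : ∃ f, fuel = f + 1 := ⟨fuel - 1, by simp at hf; omega⟩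
    have hninf : ¬ pbeg <:+: (c :: t) := fun hi => by
      obtain ⟨j, hj⟩ := (pvInfix_iff_exists _ _).mp hi
      exact h j hj
    have hfind : PySem.Chars.find (c :: t) pbeg = -1 :=
      (PySem.Chars.find_eq_neg_one_iff _ _).mpr hninf
    simp [pvLoopB, hfind]

lemma pvToList_ne_nil (e : String) (h : e ≠ "") : e.toList ≠ [] :=
  fun hl => h (String.toList_eq_nil_iff.mp hl)

-- ===== VERDICT (by name: the statement is the Claim_ definition above) =====
theorem readStringPair_spec : Claim_equal_readStringPair := by
  intro s b e _ hpre
  unfold Spec_readStringPair readStringPair readStringPair_alt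
  rcases hpre with hpre | hpre
  · exact pvMain b.toList e.toList (pvToList_ne_nil e hpre) (s.toList.length + 1) s.toList _ _ []
      (by omega) (by omega) (by omega)
  · have hall : ∀ j, ¬ b.toList <+: s.toList.drop j := by
      intro j hj
      have hin : PySem.Chars.isIn b.toList s.toList = true :=
        (PySem.Chars.exists_prefix_drop_iff_isIn _ _).mp ⟨j, hj⟩
      simp at hpre
      rw [hpre] at hin
      cases hin
    rw [pvLoopA_emitAll _ _ _ hall _ (by omega), pvLoopB_emitAll _ _ _ hall _ (by omega)]
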